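-- pv_equiv track=rewrite | github.com/khrannas/stratlogic-scrape | src/services/document_processing.py | _find_table_patterns
-- ===== SOURCE A (Python) =====
-- from typing import List, Dict, Any, Optional, Tuple
--
-- def _find_table_patterns(text_content: str) -> List[List[List[str]]]:
--     """Find table patterns in text content."""
--     tables = []
--     lines = text_content.split('\n')
--
--     current_table = []
--     in_table = False
--
--     for line in lines:
--         line = line.strip()
--
--         # Check if line looks like table data (contains multiple separators)
--         separators = ['|', '\t', '  ']  # Common table separators
--         has_separators = any(sep in line for sep in separators)
--
--         if has_separators and len(line.split()) > 2:
--             # This looks like table data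
--             if not in_table:
--                 in_table = True
--                 current_table = []
--
--             # Parse table row
--             if '|' in line:
--                 # Pipe-separated
--                 row = [cell.strip() for cell in line.split('|')]
--             elif '\t' in line:
--                 # Tab-separated
--                 row = [cell.strip() for cell in line.split('\t')]
--             else:
--                 # Space-separated (multiple spaces)
--                 row = [cell.strip() for cell in line.split('  ') if cell.strip()]
--
--             if row:
--                 current_table.append(row)
--         else:
--             # End of table
--             if in_table and current_table:
--                 tables.append(current_table)
--                 current_table = []
--                 in_table = False
--
--     # Add final table if exists
--     if in_table and current_table:
--         tables.append(current_table)
--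
--     return tables
-- ===== SOURCE B (Python) =====
-- from typing import List
--
--
-- def _is_table_line(line: str) -> bool:
--     return any(sep in line for sep in ('|', '\t', '  ')) and len(line.split()) > 2
--
--
-- def _parse_row(line: str) -> List[str]:
--     if '|' in line:
--         return [cell.strip() for cell in line.split('|')]
--     if '\t' in line:
--         return [cell.strip() for cell in line.split('\t')]
--     return [cell.strip() for cell in line.split('  ') if cell.strip()]
--
--
-- def _find_table_patterns(text_content: str) -> List[List[List[str]]]:
--     """Find table patterns in text content."""
--     lines = [ln.strip() for ln in text_content.split('\n')]
--     n = len(lines)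
--     mask = [_is_table_line(ln) for ln in lines]
--     # boundary detection over the mask: a table starts where True follows a
--     # non-True position, and ends where True precedes a non-True position
--     starts = [i for i in range(n) if mask[i] and (i == 0 or not mask[i - 1])]
--     ends = [i + 1 for i in range(n) if mask[i] and (i == n - 1 or not mask[i + 1])]
--     return [[_parse_row(ln) for ln in lines[s:e]] for s, e in zip(starts, ends)]
-- ===== Notes on version B (the rewrite author's own statement) =====
-- stated objective: alternative
-- what changed: Replaces A's stateful single pass (in_table flag, mutable current_table, end-of-loop flush) with staged passes: a boolean mask over the stripped lines, arithmetic boundary detection (start where True follows non-True, end where True precedes non-True), and table construction by slicing lines[s:e] for each zipped boundary pair.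
import Mathlib
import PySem

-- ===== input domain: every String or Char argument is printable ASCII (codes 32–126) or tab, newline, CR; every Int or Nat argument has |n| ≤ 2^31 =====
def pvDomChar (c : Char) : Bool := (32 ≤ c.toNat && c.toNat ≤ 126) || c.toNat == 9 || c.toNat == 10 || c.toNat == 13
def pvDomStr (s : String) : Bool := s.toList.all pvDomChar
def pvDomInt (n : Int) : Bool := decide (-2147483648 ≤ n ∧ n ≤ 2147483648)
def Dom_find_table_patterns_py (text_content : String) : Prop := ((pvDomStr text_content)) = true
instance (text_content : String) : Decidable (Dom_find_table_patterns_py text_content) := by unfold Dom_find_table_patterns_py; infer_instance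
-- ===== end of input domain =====

-- B replaces A's stateful single pass (in_table flag, mutable current_table, final flush)
-- by staged passes: a boolean mask over the stripped lines, arithmetic boundary detection
-- of the True runs (start/end index lists), and slicing lines[s:e] per boundary pair
-- (objective: alternative; same asymptotic cost).

-- s.split(sep) for the fixed nonempty separators used below (exact: PySem.Str.split? s sep
-- returns some of exactly this list whenever sep ≠ "").
def pvSplit (s sep : String) : List String :=
  (PySem.Chars.splitOn s.toList sep.toList).map String.ofList

-- ===== PORT A =====
-- loop body of A, applied to the already stripped line (A does `line = line.strip()` first)
def pvStepBody (acc : List (List (List String)) × List (List String) × Bool) (line : String) :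
    List (List (List String)) × List (List String) × Bool :=
  if (["|", "\t", "  "].any (fun sep => PySem.Str.isIn sep line)) &&
      decide ((PySem.Str.split₀ line).length > 2) then
    let current_table := if acc.2.2 then acc.2.1 else []
    let row :=
      if PySem.Str.isIn "|" line then (pvSplit line "|").map PySem.Str.strip
      else if PySem.Str.isIn "\t" line then (pvSplit line "\t").map PySem.Str.strip
      else ((pvSplit line "  ").filter (fun cell => !(PySem.Str.strip cell == ""))).map PySem.Str.strip
    if !row.isEmpty then (acc.1, current_table ++ [row], true) else (acc.1, current_table, true)
  else
    if acc.2.2 && !acc.2.1.isEmpty then (acc.1 ++ [acc.2.1], [], false) else acc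

def find_table_patterns_py (text_content : String) : List (List (List String)) :=
  let lines := pvSplit text_content "\n"
  let acc := lines.foldl (fun a line => pvStepBody a (PySem.Str.strip line)) ([], [], false)
  if acc.2.2 && !acc.2.1.isEmpty then acc.1 ++ [acc.2.1] else acc.1

-- ===== PORT B =====
def pvIsTableLine (line : String) : Bool :=
  (["|", "\t", "  "].any (fun sep => PySem.Str.isIn sep line)) &&
    decide ((PySem.Str.split₀ line).length > 2)

def pvParseRow (line : String) : List String :=
  if PySem.Str.isIn "|" line then (pvSplit line "|").map PySem.Str.strip
  else if PySem.Str.isIn "\t" line then (pvSplit line "\t").map PySem.Str.strip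
  else ((pvSplit line "  ").filter (fun cell => !(PySem.Str.strip cell == ""))).map PySem.Str.strip

def find_table_patterns_py_alt (text_content : String) : List (List (List String)) :=
  let lines := (pvSplit text_content "\n").map PySem.Str.strip
  let n := lines.length
  let mask := lines.map pvIsTableLine
  let starts := (List.range n).filter
    (fun i => mask.getD i false && (decide (i = 0) || !(mask.getD (i - 1) false)))
  let ends : List Nat := ((List.range n).filter
    (fun i => mask.getD i false && (decide (i = n - 1) || !(mask.getD (i + 1) false)))).map (· + 1)
  (starts.zip ends).map (fun se =>
    (PySem.List.slice lines (some (se.1 : Int)) (some (se.2 : Int))).map pvParseRow)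

-- ===== PRECONDITION & SPEC =====
def Spec_find_table_patterns_py (text_content : String) (out : List (List (List String))) : Prop := out = find_table_patterns_py_alt text_content
instance (text_content : String) (out : List (List (List String))) : Decidable (Spec_find_table_patterns_py text_content out) := by unfold Spec_find_table_patterns_py; infer_instance

-- ===== CLAIM (what is proved, stated in full; the proofs are below) =====
def Claim_equal_find_table_patterns_py : Prop := ∀ (text_content : String), Dom_find_table_patterns_py text_content → Spec_find_table_patterns_py text_content (find_table_patterns_py text_content)

-- ===== LEMMAS AND PROOFS =====

-- A's final flush step
def pvFlush (acc : List (List (List String)) × List (List String) × Bool) : List (List (List String)) :=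
  if acc.2.2 && !acc.2.1.isEmpty then acc.1 ++ [acc.2.1] else acc.1

-- the maximal consecutive runs of table lines, parsed: common intermediate form
def pvRuns (key : String → Bool) : List String → List (Bool × List String)
  | [] => []
  | x :: xs =>
    (key x, x :: xs.takeWhile (fun y => key y == key x)) ::
      pvRuns key (xs.dropWhile (fun y => key y == key x))
  termination_by l => l.length
  decreasing_by
    have := List.length_dropWhile_le (fun y => key y == key x) xs
    simp only [List.length_cons]
    omega

def pvAlt (L : List String) : List (List (List String)) :=
  (pvRuns pvIsTableLine L).filterMap (fun g => if g.1 then some (g.2.map pvParseRow) else none)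

-- B's boundary pairs, in recursive run form (off = absolute index of the list's head)
def pvBounds (off : Nat) : List String → List (Nat × Nat)
  | [] => []
  | x :: xs =>
    if pvIsTableLine x then
      (off, off + (xs.takeWhile pvIsTableLine).length + 1) ::
        pvBounds (off + (xs.takeWhile pvIsTableLine).length + 1) (xs.dropWhile pvIsTableLine)
    else pvBounds (off + 1) xs
  termination_by l => l.length
  decreasing_by
    · have := List.length_dropWhile_le pvIsTableLine xs
      simp only [List.length_cons]; omega
    · simp only [List.length_cons]; omega

-- B's start-index list generalised over the mask value preceding the list
def pvS (prev : Bool) (L : List String) : List Nat :=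
  (List.range L.length).filter
    (fun i => (L.map pvIsTableLine).getD i false &&
      (if i = 0 then !prev else !((L.map pvIsTableLine).getD (i - 1) false)))

-- B's end-index list (the `i = n-1` disjunct absorbed into getD's default)
def pvE (L : List String) : List Nat :=
  (List.range L.length).filter
    (fun i => (L.map pvIsTableLine).getD i false && !((L.map pvIsTableLine).getD (i + 1) false))

-- ---------- A-side lemmas (A's fold = pvAlt) ----------

lemma pv_splitOn_go_ne_nil (sep : List Char) :
    ∀ (fuel : Nat) (l cur : List Char) (acc : List (List Char)),
      PySem.Chars.splitOn.go sep fuel l cur acc ≠ [] := by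
  intro fuel
  induction fuel with
  | zero => intro l cur acc; rw [PySem.Chars.splitOn.go.eq_def]; simp
  | succ n ih =>
    intro l cur acc
    rw [PySem.Chars.splitOn.go.eq_def]
    cases l with
    | nil => simp
    | cons c rest =>
      simp only []
      split_ifs with h
      · exact ih _ _ _
      · exact ih _ _ _

lemma pv_splitOn_ne_nil (s sep : List Char) : PySem.Chars.splitOn s sep ≠ [] := by
  unfold PySem.Chars.splitOn; exact pv_splitOn_go_ne_nil _ _ _ _ _

lemma pv_splitOn_go_mem_acc (sep : List Char) :
    ∀ (fuel : Nat) (l cur : List Char) (acc : List (List Char)) (part : List Char),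
      part ∈ acc → part ∈ PySem.Chars.splitOn.go sep fuel l cur acc := by
  intro fuel
  induction fuel with
  | zero => intro l cur acc part h; rw [PySem.Chars.splitOn.go.eq_def]; simp [h]
  | succ n ih =>
    intro l cur acc part h
    rw [PySem.Chars.splitOn.go.eq_def]
    cases l with
    | nil => simp [h]
    | cons c rest =>
      simp only []
      split_ifs with hpre
      · exact ih _ _ _ _ (by simp [h])
      · exact ih _ _ _ _ h

lemma pv_splitOn_go_mem (sep : List Char) (hsep : ∀ d ∈ sep, PySem.Chars.isspace d = true) :
    ∀ (fuel : Nat) (l cur : List Char) (acc : List (List Char)) (c : Char),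
      PySem.Chars.isspace c = false → (c ∈ cur ∨ c ∈ l) →
      ∃ part ∈ PySem.Chars.splitOn.go sep fuel l cur acc, c ∈ part := by
  intro fuel
  induction fuel with
  | zero =>
    intro l cur acc c hc hmem
    rw [PySem.Chars.splitOn.go.eq_def]
    exact ⟨cur.reverse ++ l, by simp, by simpa using hmem⟩
  | succ n ih =>
    intro l cur acc c hc hmem
    rw [PySem.Chars.splitOn.go.eq_def]
    cases l with
    | nil =>
      simp only []
      exact ⟨cur.reverse, by simp, by simpa using hmem.resolve_right (by simp)⟩
    | cons ch rest =>
      simp only []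
      split_ifs with hpre
      · rcases hmem with hcur | hl
        · exact ⟨cur.reverse, pv_splitOn_go_mem_acc _ _ _ _ _ _ (by simp), by simpa using hcur⟩
        · have hdrop : c ∈ List.drop sep.length (ch :: rest) := by
            have hp : sep <+: (ch :: rest) := List.isPrefixOf_iff_prefix.mp hpre
            obtain ⟨tail, htail⟩ := hp
            have : c ∈ sep ++ tail := by rw [htail]; exact hl
            rcases List.mem_append.mp this with h1 | h2
            · exact absurd (hsep c h1) (by simp [hc])
            · rw [← htail, List.drop_left' rfl]; exact h2
          exact ih _ _ _ c hc (Or.inr hdrop)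
      · rcases hmem with hcur | hl
        · exact ih _ _ _ c hc (Or.inl (by simp [hcur]))
        · rcases List.mem_cons.mp hl with rfl | hrest
          · exact ih _ _ _ c hc (Or.inl (by simp))
          · exact ih _ _ _ c hc (Or.inr hrest)

lemma pv_splitOn_mem (s sep : List Char) (hsep : ∀ d ∈ sep, PySem.Chars.isspace d = true)
    (c : Char) (hc : c ∈ s) (hcs : PySem.Chars.isspace c = false) :
    ∃ part ∈ PySem.Chars.splitOn s sep, c ∈ part := by
  unfold PySem.Chars.splitOn
  exact pv_splitOn_go_mem sep hsep _ _ _ _ c hcs (Or.inr hc)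

lemma pv_split₀_go_all_space :
    ∀ (l : List Char) (acc : List (List Char)), (∀ c ∈ l, PySem.Chars.isspace c = true) →
      PySem.Chars.split₀.go l [] acc = acc.reverse := by
  intro l
  induction l with
  | nil => intro acc h; rw [PySem.Chars.split₀.go.eq_def]; simp
  | cons c rest ih =>
    intro acc h
    rw [PySem.Chars.split₀.go.eq_def]
    simp only [h c (by simp), if_true, List.isEmpty_nil]
    exact ih acc (fun d hd => h d (by simp [hd]))

lemma pv_split₀_ne_nil_nonspace (s : List Char) (h : PySem.Chars.split₀ s ≠ []) :
    ∃ c ∈ s, PySem.Chars.isspace c = false := by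
  by_contra hex
  apply h
  unfold PySem.Chars.split₀
  rw [pv_split₀_go_all_space s [] (fun c hc => by
    cases ht : PySem.Chars.isspace c
    · exact absurd ⟨c, hc, ht⟩ hex
    · rfl)]
  simp

lemma pv_strip_ne_nil {part : List Char} {c : Char} (hc : c ∈ part)
    (hcs : PySem.Chars.isspace c = false) : PySem.Chars.strip part ≠ [] := by
  intro hnil
  unfold PySem.Chars.strip PySem.Chars.rstrip PySem.Chars.lstrip at hnil
  have h1 : List.dropWhile PySem.Chars.isspace
      (List.dropWhile PySem.Chars.isspace part).reverse = [] := by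
    simpa using hnil
  have hmem : c ∈ List.dropWhile PySem.Chars.isspace part := by
    have hsplit := List.takeWhile_append_dropWhile (p := PySem.Chars.isspace) (l := part)
    rcases List.mem_append.mp (by rw [hsplit]; exact hc) with h | h
    · exact absurd (List.mem_takeWhile_imp h) (by simp [hcs])
    · exact h
  have := List.dropWhile_eq_nil_iff.mp h1 c (by simpa using hmem)
  simp [hcs] at this

lemma pv_row_ne_nil (line : String) (h : pvIsTableLine line = true) : pvParseRow line ≠ [] := by
  unfold pvParseRow
  split_ifs with h1 h2
  · simp [pvSplit, pv_splitOn_ne_nil]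
  · simp [pvSplit, pv_splitOn_ne_nil]
  · unfold pvIsTableLine at h
    rw [Bool.and_eq_true] at h
    have hlen : (PySem.Str.split₀ line).length > 2 := of_decide_eq_true h.2
    have hne : PySem.Chars.split₀ line.toList ≠ [] := by
      intro h0
      rw [PySem.Str.split₀, h0] at hlen
      simp at hlen
    obtain ⟨c, hcmem, hcs⟩ := pv_split₀_ne_nil_nonspace _ hne
    obtain ⟨part, hpmem, hcp⟩ := pv_splitOn_mem line.toList [' ', ' ']
      (by intro d hd; simp at hd; subst hd; simp [PySem.Chars.isspace])
      c hcmem hcs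
    have hcell : String.ofList part ∈ pvSplit line "  " := by
      unfold pvSplit
      rw [show ("  " : String).toList = [' ', ' '] by decide]
      exact List.mem_map_of_mem hpmem
    have hpred : (!(PySem.Str.strip (String.ofList part) == "")) = true := by
      simp only [Bool.not_eq_eq_eq_not, Bool.not_true, beq_eq_false_iff_ne, ne_eq]
      intro heq
      have hstrip : PySem.Chars.strip part = [] := by
        have := congrArg String.toList heq
        simpa [PySem.Str.strip] using this
      exact pv_strip_ne_nil hcp hcs hstrip
    intro hnil
    rw [List.map_eq_nil_iff, List.filter_eq_nil_iff] at hnil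
    exact absurd hpred (by simpa using hnil _ hcell)

lemma pv_stepBody_true {x : String} (hp : pvIsTableLine x = true)
    (t : List (List (List String))) (cur : List (List String)) (b : Bool) :
    pvStepBody (t, cur, b) x = (t, (if b then cur else []) ++ [pvParseRow x], true) := by
  have hrow := pv_row_ne_nil x hp
  unfold pvIsTableLine at hp
  unfold pvStepBody
  rw [if_pos hp]
  simp only []
  rw [if_pos (by simpa [pvParseRow, List.isEmpty_eq_false_iff] using hrow)]
  rfl

lemma pv_stepBody_false {x : String} (hp : pvIsTableLine x = false)
    (t : List (List (List String))) (cur : List (List String)) (b : Bool) :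
    pvStepBody (t, cur, b) x =
      if b && !cur.isEmpty then (t ++ [cur], [], false) else (t, cur, b) := by
  unfold pvIsTableLine at hp
  unfold pvStepBody
  rw [if_neg (fun hc => by rw [hp] at hc; exact Bool.false_ne_true hc)]

lemma pv_runs_cons_true {x : String} {xs : List String} (hp : pvIsTableLine x = true) :
    pvRuns pvIsTableLine (x :: xs) =
      (true, x :: xs.takeWhile pvIsTableLine) ::
        pvRuns pvIsTableLine (xs.dropWhile pvIsTableLine) := by
  rw [pvRuns]
  have hfun : (fun y => pvIsTableLine y == pvIsTableLine x) = pvIsTableLine := by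
    funext y; rw [hp]; simp
  rw [hfun, hp]

lemma pv_runs_cons_false {x : String} {xs : List String} (hp : pvIsTableLine x = false) :
    pvRuns pvIsTableLine (x :: xs) =
      (false, x :: xs.takeWhile (fun y => !pvIsTableLine y)) ::
        pvRuns pvIsTableLine (xs.dropWhile (fun y => !pvIsTableLine y)) := by
  rw [pvRuns]
  have hfun : (fun y => pvIsTableLine y == pvIsTableLine x) = (fun y => !pvIsTableLine y) := by
    funext y; rw [hp]; cases pvIsTableLine y <;> rfl
  rw [hfun, hp]

lemma pv_alt_cons_true {x : String} {xs : List String} (hp : pvIsTableLine x = true) :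
    pvAlt (x :: xs) =
      ((x :: xs.takeWhile pvIsTableLine).map pvParseRow) :: pvAlt (xs.dropWhile pvIsTableLine) := by
  unfold pvAlt
  rw [pv_runs_cons_true hp]
  simp

lemma pv_alt_cons_false {x : String} {xs : List String} (hp : pvIsTableLine x = false) :
    pvAlt (x :: xs) = pvAlt xs := by
  cases xs with
  | nil => unfold pvAlt; rw [pv_runs_cons_false hp]; simp [pvRuns]
  | cons y ys =>
    cases hq : pvIsTableLine y
    · unfold pvAlt
      rw [pv_runs_cons_false hp, pv_runs_cons_false hq]
      simp [hq]
    · unfold pvAlt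
      rw [pv_runs_cons_false hp]
      simp [hq]

lemma pv_main (L : List String) :
    (∀ t, pvFlush (L.foldl pvStepBody (t, [], false)) = t ++ pvAlt L) ∧
    (∀ t cur, cur ≠ [] →
      pvFlush (L.foldl pvStepBody (t, cur, true)) =
        t ++ (cur ++ (L.takeWhile pvIsTableLine).map pvParseRow) ::
          pvAlt (L.dropWhile pvIsTableLine)) := by
  induction L with
  | nil =>
    constructor
    · intro t; simp [pvFlush, pvAlt, pvRuns]
    · intro t cur hc
      simp only [List.foldl_nil, List.takeWhile_nil, List.dropWhile_nil, List.map_nil,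
        List.append_nil, pvFlush]
      rw [if_pos (by simp [List.isEmpty_eq_false_iff.mpr hc]), show pvAlt [] = [] by
        simp [pvAlt, pvRuns]]
  | cons x xs ih =>
    constructor
    · intro t
      cases hp : pvIsTableLine x
      · rw [List.foldl_cons, pv_stepBody_false hp, pv_alt_cons_false hp]
        simp only [Bool.false_and, if_neg Bool.false_ne_true]
        exact ih.1 t
      · rw [List.foldl_cons, pv_stepBody_true hp]
        simp only [if_neg Bool.false_ne_true, List.nil_append]
        rw [ih.2 t [pvParseRow x] (by simp), pv_alt_cons_true hp]
        simp
    · intro t cur hc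
      cases hp : pvIsTableLine x
      · rw [List.foldl_cons, pv_stepBody_false hp,
          if_pos (by simp [List.isEmpty_eq_false_iff.mpr hc])]
        rw [ih.1 (t ++ [cur])]
        rw [List.takeWhile_cons_of_neg (by simp [hp]), List.dropWhile_cons_of_neg (by simp [hp])]
        rw [pv_alt_cons_false hp]
        simp
      · rw [List.foldl_cons, pv_stepBody_true hp, if_pos rfl]
        rw [ih.2 t (cur ++ [pvParseRow x]) (by simp)]
        rw [List.takeWhile_cons_of_pos (by simp [hp]), List.dropWhile_cons_of_pos (by simp [hp])]
        simp

lemma pv_final (lines : List String) :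
    pvFlush (lines.foldl (fun a l => pvStepBody a (PySem.Str.strip l)) ([], [], false)) =
      pvAlt (lines.map PySem.Str.strip) := by
  rw [show lines.foldl (fun a l => pvStepBody a (PySem.Str.strip l)) (([], [], false) :
        List (List (List String)) × List (List String) × Bool) =
      (lines.map PySem.Str.strip).foldl pvStepBody ([], [], false) from
    (List.foldl_map ..).symm]
  simpa using (pv_main (lines.map PySem.Str.strip)).1 []

-- ---------- B-side lemmas (mask/boundary/slice pipeline = pvAlt) ----------

-- peeling one index off a filtered range
lemma pv_filter_range_succ (p : Nat → Bool) (n : Nat) :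
    (List.range (n + 1)).filter p =
      (if p 0 then [0] else []) ++ ((List.range n).filter (fun j => p (j + 1))).map (· + 1) := by
  rw [List.range_succ_eq_map, List.filter_cons]
  have : (List.map Nat.succ (List.range n)).filter p =
      ((List.range n).filter (fun j => p (j + 1))).map (· + 1) := by
    rw [List.filter_map]
    rfl
  rw [this]
  split_ifs <;> simp

lemma pv_filter_range_succ' (p q : Nat → Bool) (b : Bool) (n : Nat) (hb : p 0 = b)
    (h : ∀ j, p (j + 1) = q j) :
    (List.range (n + 1)).filter p =
      (if b then [0] else []) ++ ((List.range n).filter q).map (· + 1) := by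
  rw [pv_filter_range_succ, hb]
  congr 1
  congr 1
  exact List.filter_congr (fun j _ => h j)

lemma pvS_cons (prev : Bool) (x : String) (xs : List String) :
    pvS prev (x :: xs) =
      (if pvIsTableLine x && !prev then [0] else []) ++ (pvS (pvIsTableLine x) xs).map (· + 1) := by
  unfold pvS
  rw [List.length_cons]
  exact pv_filter_range_succ' _ _ _ _ (by simp) (fun j => by cases j <;> simp)

lemma pvE_cons (x : String) (xs : List String) :
    pvE (x :: xs) =
      (if pvIsTableLine x && !((xs.map pvIsTableLine).getD 0 false) then [0] else []) ++
        (pvE xs).map (· + 1) := by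
  unfold pvE
  rw [List.length_cons]
  exact pv_filter_range_succ' _ _ _ _ (by simp [List.getD]) (fun j => by simp)

-- the head of a dropWhile-suffix fails the predicate (in getD-mask form)
lemma pv_dropWhile_headmask (xs : List String) :
    ((xs.dropWhile pvIsTableLine).map pvIsTableLine).getD 0 false = false := by
  induction xs with
  | nil => simp
  | cons y ys ih =>
    cases hy : pvIsTableLine y
    · rw [List.dropWhile_cons_of_neg (by simp [hy])]
      simp [hy]
    · rw [List.dropWhile_cons_of_pos (by simp [hy])]
      exact ih

lemma pvS_run :
    ∀ (t d : List String), (∀ y ∈ t, pvIsTableLine y = true) →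
      ((d.map pvIsTableLine).getD 0 false = false) →
      pvS true (t ++ d) = (pvS false d).map (· + t.length) := by
  intro t
  induction t with
  | nil =>
    intro d _ hd
    have h0 : (Option.map pvIsTableLine d[0]?).getD false = false := by
      simpa [List.getD, List.getElem?_map] using hd
    have : pvS true d = pvS false d := by
      unfold pvS
      apply List.filter_congr
      intro i _
      cases i with
      | zero => simp [List.getD, List.getElem?_map, h0]
      | succ k => simp
    simp [this]
  | cons c t' ih =>
    intro d ht hd
    have hc : pvIsTableLine c = true := ht c (by simp)
    rw [List.cons_append, pvS_cons, hc]
    simp only [Bool.not_true, Bool.and_false, if_neg Bool.false_ne_true, List.nil_append]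
    rw [ih d (fun y hy => ht y (by simp [hy])) hd, List.map_map]
    rw [List.length_cons]
    congr 1

lemma pvE_run :
    ∀ (t d : List String), t ≠ [] → (∀ y ∈ t, pvIsTableLine y = true) →
      ((d.map pvIsTableLine).getD 0 false = false) →
      pvE (t ++ d) = (t.length - 1) :: (pvE d).map (· + t.length) := by
  intro t
  induction t with
  | nil => intro d h; exact absurd rfl h
  | cons c t' ih =>
    intro d _ ht hd
    have hc : pvIsTableLine c = true := ht c (by simp)
    cases t' with
    | nil =>
      rw [List.cons_append, List.nil_append, pvE_cons, hc, hd]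
      simp
    | cons y t'' =>
      have hy : pvIsTableLine y = true := ht y (by simp)
      rw [List.cons_append, pvE_cons]
      have hhead : (((y :: t'') ++ d).map pvIsTableLine).getD 0 false = true := by simp [hy]
      rw [hhead, hc]
      simp only [Bool.not_true, Bool.and_false, if_neg Bool.false_ne_true, List.nil_append]
      rw [ih d (by simp) (fun z hz => ht z (by simp [hz])) hd, List.map_cons, List.map_map]
      congr 1

lemma pvBounds_shift :
    ∀ (n : Nat) (L : List String), L.length ≤ n → ∀ off,
      pvBounds off L = (pvBounds 0 L).map (fun p => (p.1 + off, p.2 + off)) := by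
  intro n
  induction n with
  | zero =>
    intro L hL off
    rw [List.length_eq_zero_iff.mp (Nat.le_zero.mp hL)]
    simp [pvBounds]
  | succ m ih =>
    intro L hL off
    cases L with
    | nil => simp [pvBounds]
    | cons x xs =>
      have hxs : xs.length ≤ m := by
        simp only [List.length_cons] at hL
        omega
      cases hx : pvIsTableLine x
      · rw [pvBounds, pvBounds, if_neg (by simp [hx]), if_neg (by simp [hx])]
        rw [ih xs hxs (off + 1), ih xs hxs 1, List.map_map]
        congr 1
        funext p
        cases p
        dsimp only [Function.comp_apply]
        simp only [Prod.mk.injEq]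
        constructor <;> omega
      · rw [pvBounds, pvBounds, if_pos hx, if_pos hx]
        have hd : (xs.dropWhile pvIsTableLine).length ≤ m := by
          have := List.length_dropWhile_le pvIsTableLine xs
          omega
        rw [ih _ hd (off + (List.takeWhile pvIsTableLine xs).length + 1),
          ih _ hd (0 + (List.takeWhile pvIsTableLine xs).length + 1), List.map_cons, List.map_map]
        congr 1
        · simp only [Prod.mk.injEq]
          constructor <;> omega
        · congr 1
          funext p
          cases p
          dsimp only [Function.comp_apply]
          simp only [Prod.mk.injEq]
          constructor <;> omega

lemma pv_zip_bounds :
    ∀ (n : Nat) (L : List String), L.length ≤ n →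
      (pvS false L).zip ((pvE L).map (· + 1)) = pvBounds 0 L := by
  intro n
  induction n with
  | zero =>
    intro L hL
    rw [List.length_eq_zero_iff.mp (Nat.le_zero.mp hL)]
    simp [pvS, pvE, pvBounds]
  | succ m ih =>
    intro L hL
    cases L with
    | nil => simp [pvS, pvE, pvBounds]
    | cons x xs =>
      have hxs : xs.length ≤ m := by
        simp only [List.length_cons] at hL
        omega
      cases hx : pvIsTableLine x
      · rw [pvS_cons, pvE_cons, hx]
        simp only [Bool.false_and, if_neg Bool.false_ne_true, List.nil_append]
        rw [List.zip_map, ih xs hxs]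
        rw [pvBounds, if_neg (by simp [hx]), pvBounds_shift xs.length xs le_rfl 1]
        congr 1
      · set t := xs.takeWhile pvIsTableLine with ht
        set d := xs.dropWhile pvIsTableLine with hd2
        have hxseq : xs = t ++ d := (List.takeWhile_append_dropWhile).symm
        have htall : ∀ y ∈ t, pvIsTableLine y = true := fun y hy => List.mem_takeWhile_imp hy
        have hdhead : ((d.map pvIsTableLine).getD 0 false) = false := pv_dropWhile_headmask xs
        have hdlen : d.length ≤ m := by
          have h1 : d.length ≤ xs.length := hd2 ▸ List.length_dropWhile_le pvIsTableLine xs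
          omega
        have hS : pvS false (x :: xs) = 0 :: (pvS false d).map (· + (t.length + 1)) := by
          rw [pvS_cons, hx]
          simp only [Bool.not_false, Bool.and_true]
          rw [hxseq, pvS_run t d htall hdhead, List.map_map]
          congr 1
        have hE : pvE (x :: xs) = t.length :: (pvE d).map (· + (t.length + 1)) := by
          have hsplit : x :: xs = (x :: t) ++ d := by rw [hxseq]; rfl
          rw [hsplit, pvE_run (x :: t) d (by simp)
            (by
              intro y hy
              rcases List.mem_cons.mp hy with rfl | h
              · exact hx
              · exact htall y h) hdhead]
          simp
        rw [hS, hE, List.map_cons, List.zip_cons_cons]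
        have hEmap : ((pvE d).map (· + (t.length + 1))).map (· + 1) =
            ((pvE d).map (· + 1)).map (· + (t.length + 1)) := by
          rw [List.map_map, List.map_map]
          congr 1
          funext i
          simp only [Function.comp_apply]
          omega
        rw [hEmap, List.zip_map, ih d hdlen]
        rw [pvBounds, if_pos hx, ← ht, ← hd2]
        simp only [Nat.zero_add]
        rw [pvBounds_shift d.length d le_rfl (t.length + 1)]
        congr 1

lemma pv_bounds_slices :
    ∀ (n : Nat) (d : List String), d.length ≤ n → ∀ (L pre : List String), L = pre ++ d →
      (pvBounds pre.length d).map
        (fun se => ((L.drop se.1).take (se.2 - se.1)).map pvParseRow) = pvAlt d := by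
  intro n
  induction n with
  | zero =>
    intro d hd L pre _
    rw [List.length_eq_zero_iff.mp (Nat.le_zero.mp hd)]
    simp [pvBounds, pvAlt, pvRuns]
  | succ m ih =>
    intro d hd L pre hL
    cases d with
    | nil => simp [pvBounds, pvAlt, pvRuns]
    | cons x xs =>
      have hxs : xs.length ≤ m := by simpa using hd
      cases hx : pvIsTableLine x
      · rw [pvBounds, if_neg (by simp [hx]), pv_alt_cons_false hx]
        have : pre.length + 1 = (pre ++ [x]).length := by simp
        rw [this]
        exact ih xs hxs L (pre ++ [x]) (by rw [hL]; simp)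
      · set t := xs.takeWhile pvIsTableLine with ht
        set dd := xs.dropWhile pvIsTableLine with hdd
        have hxseq : xs = t ++ dd := (List.takeWhile_append_dropWhile).symm
        have hddlen : dd.length ≤ m := by
          have h1 : dd.length ≤ xs.length := hdd ▸ List.length_dropWhile_le pvIsTableLine xs
          omega
        rw [pvBounds, if_pos hx, ← ht, ← hdd, List.map_cons, pv_alt_cons_true hx, ← ht, ← hdd]
        congr 1
        · have hdrop : L.drop pre.length = x :: xs := by
            rw [hL, List.drop_left]
          have hsub : pre.length + t.length + 1 - pre.length = t.length + 1 := by omega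
          rw [hsub, hdrop]
          rw [List.take_succ_cons, hxseq, List.take_left' rfl]
        · have hlen2 : pre.length + t.length + 1 = (pre ++ (x :: t)).length := by simp; omega
          rw [hlen2]
          exact ih dd hddlen L (pre ++ (x :: t)) (by rw [hL, hxseq]; simp)

lemma pv_B_eq (L : List String) :
    ((((List.range L.length).filter (fun i => (L.map pvIsTableLine).getD i false &&
        (decide (i = 0) || !((L.map pvIsTableLine).getD (i - 1) false)))).zip
      ((((List.range L.length).filter (fun i => (L.map pvIsTableLine).getD i false &&
        (decide (i = L.length - 1) || !((L.map pvIsTableLine).getD (i + 1) false)))).map (· + 1) : List Nat))).map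
      (fun se => (PySem.List.slice L (some (se.1 : Int)) (some (se.2 : Int))).map pvParseRow)) =
      pvAlt L := by
  have hstarts : ((List.range L.length).filter (fun i => (L.map pvIsTableLine).getD i false &&
      (decide (i = 0) || !((L.map pvIsTableLine).getD (i - 1) false)))) = pvS false L := by
    unfold pvS
    congr 1
    funext i
    cases i with
    | zero => simp
    | succ k => simp
  have hends : ((List.range L.length).filter (fun i => (L.map pvIsTableLine).getD i false &&
      (decide (i = L.length - 1) || !((L.map pvIsTableLine).getD (i + 1) false)))) = pvE L := by
    unfold pvE
    apply List.filter_congr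
    intro i hi
    have hilt : i < L.length := List.mem_range.mp hi
    by_cases h : i = L.length - 1
    · subst h
      have h2 : L[L.length - 1 + 1]? = none := by
        rw [List.getElem?_eq_none_iff]
        omega
      simp [List.getD, List.getElem?_map, h2]
    · simp [h]
  have hslice : (fun se : Nat × Nat =>
      (PySem.List.slice L (some (se.1 : Int)) (some (se.2 : Int))).map pvParseRow) =
      (fun se : Nat × Nat => ((L.drop se.1).take (se.2 - se.1)).map pvParseRow) := by
    funext se
    rw [PySem.List.slice_natCast]
  rw [hstarts, hends, pv_zip_bounds L.length L le_rfl, hslice]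
  exact pv_bounds_slices L.length L le_rfl L [] (by simp)

theorem find_table_patterns_py_spec : Claim_equal_find_table_patterns_py := by
  intro s _
  show find_table_patterns_py s = find_table_patterns_py_alt s
  have hA : find_table_patterns_py s = pvAlt ((pvSplit s "\n").map PySem.Str.strip) :=
    pv_final (pvSplit s "\n")
  have hB : find_table_patterns_py_alt s = pvAlt ((pvSplit s "\n").map PySem.Str.strip) :=
    pv_B_eq ((pvSplit s "\n").map PySem.Str.strip)
  rw [hA, hB]
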